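-- pv_equiv track=rewrite | github.com/Thisal-D/IP-Address-Calculator | flsm cal.py | class_a_range
-- ===== SOURCE A (Python) =====
-- def class_a_range(ip1,ip2,ip3,ip4,block_size,block_get):
--     ip_ranges = []
--     ip_usable_ranges = []
--     all_range = []
--
--     loop_run = 1
--
--     if block_get == 4 :
--         if block_size != 1:
--             for ip2 in range(0,256,1) :
--                 for ip3 in range(0,256,1) :
--                     for ip4 in range(0,256,block_size):
--                         ip_add = str(ip1) + "." + str(ip2) + "." + str(ip3) + "." + str(ip4)
--                         ip_add2 = str(ip1) + "." + str(ip2) + "." + str(ip3) + "." + str(ip4+block_size-1)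
--                         ip_range =  ip_add + "     -     "  + ip_add2
--                         ip_ranges.append(ip_range)
--
--                         if block_size >2 :
--                             ip_add_us = str(ip1) + "." + str(ip2) + "." + str(ip3) + "." + str(ip4+1)
--                             ip_add_us2 = str(ip1) + "." + str(ip2) + "." + str(ip3) + "." + str(ip4+block_size-2)
--                             ip_range_us = ip_add_us + "     -     "  + ip_add_us2
--                             ip_usable_ranges.append(ip_range_us)
--                         if loop_run == 6 :
--                             break
--                         loop_run += 1
--                     if loop_run == 6 :
--                         break
--                 if loop_run == 6 :
--                     break
--
--     if block_get == 3 :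
--         for ip2 in range(0,256,1):
--             for ip3 in range(0,256,block_size):
--                 ip_add = str(ip1) + "." + str(ip2) + "." + str(ip3) + "." + str(0)
--                 ip_add2 = str(ip1) + "." + str(ip2) + "." + str(ip3+block_size-1) + "." + str(255)
--                 ip_range =  ip_add + "     -     "  + ip_add2
--                 ip_ranges.append(ip_range)
--
--                 ip_add_us = str(ip1) + "." + str(ip2) + "." + str(ip3) + "." + str(1)
--                 ip_add_us2 = str(ip1) + "." + str(ip2) + "." + str(ip3+block_size-1) + "." + str(254)
--                 ip_range_us = ip_add_us + "     -     "  + ip_add_us2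
--                 ip_usable_ranges.append(ip_range_us)
--                 if loop_run == 6 :
--                      break
--                 loop_run +=1
--             if loop_run == 6 :
--                 break
--
--     if block_get == 2 :
--         for ip2 in range(0,256,block_size):
--             ip_add = str(ip1) + "." + str(ip2) + "." + str(255) + "." + str(0)
--             ip_add2 = str(ip1) + "." + str(ip2+block_size-1) + "." + str(255) + "." + str(255)
--             ip_range =  ip_add + "     -     "  + ip_add2
--             ip_ranges.append(ip_range)
--
--             ip_add_us = str(ip1) + "." + str(ip2) + "." + str(255) + "." + str(1)
--             ip_add_us2 = str(ip1) + "." + str(ip2+block_size-1) + "." + str(255) + "." + str(254)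
--             ip_range_us = ip_add_us + "     -     "  + ip_add_us2
--             ip_usable_ranges.append(ip_range_us)
--             if loop_run == 6 :
--                 break
--             loop_run +=1
--
--     all_range.append(ip_ranges)
--     all_range.append(ip_usable_ranges)
--
--     return all_range
-- ===== SOURCE B (Python) =====
-- def class_a_range(ip1, ip2, ip3, ip4, block_size, block_get):
--     # Indexed construction: the first 6 subnet ranges, octets derived by divmod
--     # on the row index, instead of nested 0..255 sweeps.
--     ranges, usable = [], []
--     if block_get == 4 and block_size != 1:
--         n = len(range(0, 256, block_size))
--         for i in range(6 if n else 0):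
--             carry, step = divmod(i, n)
--             o4 = step * block_size
--             base = f"{ip1}.0.{carry}."
--             ranges.append(f"{base}{o4}     -     {base}{o4 + block_size - 1}")
--             if block_size > 2:
--                 usable.append(f"{base}{o4 + 1}     -     {base}{o4 + block_size - 2}")
--     elif block_get == 3:
--         n = len(range(0, 256, block_size))
--         for i in range(6 if n else 0):
--             carry, step = divmod(i, n)
--             o3 = step * block_size
--             ranges.append(f"{ip1}.{carry}.{o3}.0     -     {ip1}.{carry}.{o3 + block_size - 1}.255")
--             usable.append(f"{ip1}.{carry}.{o3}.1     -     {ip1}.{carry}.{o3 + block_size - 1}.254")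
--     elif block_get == 2:
--         n = len(range(0, 256, block_size))
--         for i in range(min(6, n)):
--             o2 = i * block_size
--             ranges.append(f"{ip1}.{o2}.255.0     -     {ip1}.{o2 + block_size - 1}.255.255")
--             usable.append(f"{ip1}.{o2}.255.1     -     {ip1}.{o2 + block_size - 1}.255.254")
--     return [ranges, usable]
-- ===== Notes on version B (the rewrite author's own statement) =====
-- stated objective: alternative
-- what changed: Replaces A's three nested 0..255 sweeps with a shared loop_run break counter by a single indexed loop of at most 6 iterations that derives each octet directly by divmod on the row index; Pre_ only excludes block_size = 0 with block_get in {2,3,4}, where both programs' range(0,256,0) raises ValueError.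
-- intended difference: For block_get 3 or 4 with 52 <= block_size <= 63 or block_size >= 256 (inner range length 1 or 5), A's break counter stops after only 5 rows because the inner sweep ends exactly when loop_run reaches 6; B returns the intended 6-row preview. — e.g. on class_a_range(10, 0, 0, 0, 256, 3): A returns [["10.0.0.0 - 10.0.255.255", "10.1.0.0 - 10.1.255.255", "10.2.0.0 - 10.2.255.255", "10.3.0.0 - 10.3.255.255", "10.4.0.0…, B returns [["10.0.0.0 - 10.0.255.255", "10.1.0.0 - 10.1.255.255", "10.2.0.0 - 10.2.255.255", "10.3.0.0 - 10.3.255.255", "10.4.0.0…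
import Mathlib
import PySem

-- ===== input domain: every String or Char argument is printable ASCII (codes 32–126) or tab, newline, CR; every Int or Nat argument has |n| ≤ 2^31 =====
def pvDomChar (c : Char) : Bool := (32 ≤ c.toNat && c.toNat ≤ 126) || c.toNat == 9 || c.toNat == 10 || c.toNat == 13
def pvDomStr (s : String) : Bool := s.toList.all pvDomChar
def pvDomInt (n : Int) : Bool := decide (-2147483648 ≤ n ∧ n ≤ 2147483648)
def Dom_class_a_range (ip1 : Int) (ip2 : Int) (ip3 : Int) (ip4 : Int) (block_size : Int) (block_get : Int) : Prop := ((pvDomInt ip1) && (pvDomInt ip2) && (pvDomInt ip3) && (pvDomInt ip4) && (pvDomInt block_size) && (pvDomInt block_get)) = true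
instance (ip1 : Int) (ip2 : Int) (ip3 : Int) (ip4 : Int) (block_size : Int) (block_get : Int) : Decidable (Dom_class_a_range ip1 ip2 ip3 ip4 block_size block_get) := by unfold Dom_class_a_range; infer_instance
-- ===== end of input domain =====

-- B replaces A's nested 0..255 sweeps with a shared break counter by a single indexed loop
-- of at most 6 rows whose octets are derived by divmod (objective: alternative); where A's
-- counter accidentally stops at 5 rows, B returns the intended 6 (see D_ below).

def pvSep : String := "     -     "

-- ===== PORT A =====
-- state: (ip_ranges, ip_usable_ranges, loop_run)
def pvA4inner (ip1 ip2 ip3 bs : Int) : List Int → List String × List String × Int → List String × List String × Int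
  | [], st => st
  | ip4 :: rest, (rs, us, lr) =>
      let ip_add := PySem.Int.toStr ip1 ++ "." ++ PySem.Int.toStr ip2 ++ "." ++ PySem.Int.toStr ip3 ++ "." ++ PySem.Int.toStr ip4
      let ip_add2 := PySem.Int.toStr ip1 ++ "." ++ PySem.Int.toStr ip2 ++ "." ++ PySem.Int.toStr ip3 ++ "." ++ PySem.Int.toStr (ip4 + bs - 1)
      let rs' := rs ++ [ip_add ++ pvSep ++ ip_add2]
      let us' := if bs > 2 then
          let ip_add_us := PySem.Int.toStr ip1 ++ "." ++ PySem.Int.toStr ip2 ++ "." ++ PySem.Int.toStr ip3 ++ "." ++ PySem.Int.toStr (ip4 + 1)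
          let ip_add_us2 := PySem.Int.toStr ip1 ++ "." ++ PySem.Int.toStr ip2 ++ "." ++ PySem.Int.toStr ip3 ++ "." ++ PySem.Int.toStr (ip4 + bs - 2)
          us ++ [ip_add_us ++ pvSep ++ ip_add_us2]
        else us
      if lr = 6 then (rs', us', lr) else pvA4inner ip1 ip2 ip3 bs rest (rs', us', lr + 1)

def pvA4mid (ip1 ip2 bs : Int) : List Int → List String × List String × Int → List String × List String × Int
  | [], st => st
  | ip3 :: rest, st =>
      let st' := pvA4inner ip1 ip2 ip3 bs (PySem.List.pyRange 0 256 bs) st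
      if st'.2.2 = 6 then st' else pvA4mid ip1 ip2 bs rest st'

def pvA4outer (ip1 bs : Int) : List Int → List String × List String × Int → List String × List String × Int
  | [], st => st
  | ip2 :: rest, st =>
      let st' := pvA4mid ip1 ip2 bs (PySem.List.pyRange 0 256 1) st
      if st'.2.2 = 6 then st' else pvA4outer ip1 bs rest st'

def pvA3inner (ip1 ip2 bs : Int) : List Int → List String × List String × Int → List String × List String × Int
  | [], st => st
  | ip3 :: rest, (rs, us, lr) =>
      let ip_add := PySem.Int.toStr ip1 ++ "." ++ PySem.Int.toStr ip2 ++ "." ++ PySem.Int.toStr ip3 ++ "." ++ PySem.Int.toStr (0 : Int)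
      let ip_add2 := PySem.Int.toStr ip1 ++ "." ++ PySem.Int.toStr ip2 ++ "." ++ PySem.Int.toStr (ip3 + bs - 1) ++ "." ++ PySem.Int.toStr (255 : Int)
      let rs' := rs ++ [ip_add ++ pvSep ++ ip_add2]
      let ip_add_us := PySem.Int.toStr ip1 ++ "." ++ PySem.Int.toStr ip2 ++ "." ++ PySem.Int.toStr ip3 ++ "." ++ PySem.Int.toStr (1 : Int)
      let ip_add_us2 := PySem.Int.toStr ip1 ++ "." ++ PySem.Int.toStr ip2 ++ "." ++ PySem.Int.toStr (ip3 + bs - 1) ++ "." ++ PySem.Int.toStr (254 : Int)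
      let us' := us ++ [ip_add_us ++ pvSep ++ ip_add_us2]
      if lr = 6 then (rs', us', lr) else pvA3inner ip1 ip2 bs rest (rs', us', lr + 1)

def pvA3outer (ip1 bs : Int) : List Int → List String × List String × Int → List String × List String × Int
  | [], st => st
  | ip2 :: rest, st =>
      let st' := pvA3inner ip1 ip2 bs (PySem.List.pyRange 0 256 bs) st
      if st'.2.2 = 6 then st' else pvA3outer ip1 bs rest st'

def pvA2loop (ip1 bs : Int) : List Int → List String × List String × Int → List String × List String × Int
  | [], st => st
  | ip2 :: rest, (rs, us, lr) =>
      let ip_add := PySem.Int.toStr ip1 ++ "." ++ PySem.Int.toStr ip2 ++ "." ++ PySem.Int.toStr (255 : Int) ++ "." ++ PySem.Int.toStr (0 : Int)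
      let ip_add2 := PySem.Int.toStr ip1 ++ "." ++ PySem.Int.toStr (ip2 + bs - 1) ++ "." ++ PySem.Int.toStr (255 : Int) ++ "." ++ PySem.Int.toStr (255 : Int)
      let rs' := rs ++ [ip_add ++ pvSep ++ ip_add2]
      let ip_add_us := PySem.Int.toStr ip1 ++ "." ++ PySem.Int.toStr ip2 ++ "." ++ PySem.Int.toStr (255 : Int) ++ "." ++ PySem.Int.toStr (1 : Int)
      let ip_add_us2 := PySem.Int.toStr ip1 ++ "." ++ PySem.Int.toStr (ip2 + bs - 1) ++ "." ++ PySem.Int.toStr (255 : Int) ++ "." ++ PySem.Int.toStr (254 : Int)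
      let us' := us ++ [ip_add_us ++ pvSep ++ ip_add_us2]
      if lr = 6 then (rs', us', lr) else pvA2loop ip1 bs rest (rs', us', lr + 1)

def class_a_range (ip1 : Int) (ip2 : Int) (ip3 : Int) (ip4 : Int) (block_size : Int) (block_get : Int) : List (List String) :=
  let st0 : List String × List String × Int := ([], [], 1)
  let st1 := if block_get = 4 then
      (if block_size ≠ 1 then pvA4outer ip1 block_size (PySem.List.pyRange 0 256 1) st0 else st0)
    else st0
  let st2 := if block_get = 3 then pvA3outer ip1 block_size (PySem.List.pyRange 0 256 1) st1 else st1
  let st3 := if block_get = 2 then pvA2loop ip1 block_size (PySem.List.pyRange 0 256 block_size) st2 else st2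
  [st3.1, st3.2.1]

-- ===== PORT B =====
-- row builders for B (the f-strings of Source B)
def pvB4rowR (ip1 bs : Int) (n i : Nat) : String :=
  let o4 : Int := ((i % n : Nat) : Int) * bs
  let base := PySem.Int.toStr ip1 ++ ".0." ++ PySem.Int.toStr ((i / n : Nat) : Int) ++ "."
  base ++ PySem.Int.toStr o4 ++ "     -     " ++ base ++ PySem.Int.toStr (o4 + bs - 1)
def pvB4rowU (ip1 bs : Int) (n i : Nat) : String :=
  let o4 : Int := ((i % n : Nat) : Int) * bs
  let base := PySem.Int.toStr ip1 ++ ".0." ++ PySem.Int.toStr ((i / n : Nat) : Int) ++ "."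
  base ++ PySem.Int.toStr (o4 + 1) ++ "     -     " ++ base ++ PySem.Int.toStr (o4 + bs - 2)
def pvB3rowR (ip1 bs : Int) (n i : Nat) : String :=
  let o3 : Int := ((i % n : Nat) : Int) * bs
  PySem.Int.toStr ip1 ++ "." ++ PySem.Int.toStr ((i / n : Nat) : Int) ++ "." ++ PySem.Int.toStr o3 ++ ".0" ++ "     -     " ++ PySem.Int.toStr ip1 ++ "." ++ PySem.Int.toStr ((i / n : Nat) : Int) ++ "." ++ PySem.Int.toStr (o3 + bs - 1) ++ ".255"
def pvB3rowU (ip1 bs : Int) (n i : Nat) : String :=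
  let o3 : Int := ((i % n : Nat) : Int) * bs
  PySem.Int.toStr ip1 ++ "." ++ PySem.Int.toStr ((i / n : Nat) : Int) ++ "." ++ PySem.Int.toStr o3 ++ ".1" ++ "     -     " ++ PySem.Int.toStr ip1 ++ "." ++ PySem.Int.toStr ((i / n : Nat) : Int) ++ "." ++ PySem.Int.toStr (o3 + bs - 1) ++ ".254"
def pvB2rowR (ip1 bs : Int) (i : Nat) : String :=
  let o2 : Int := (i : Int) * bs
  PySem.Int.toStr ip1 ++ "." ++ PySem.Int.toStr o2 ++ ".255.0" ++ "     -     " ++ PySem.Int.toStr ip1 ++ "." ++ PySem.Int.toStr (o2 + bs - 1) ++ ".255.255"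
def pvB2rowU (ip1 bs : Int) (i : Nat) : String :=
  let o2 : Int := (i : Int) * bs
  PySem.Int.toStr ip1 ++ "." ++ PySem.Int.toStr o2 ++ ".255.1" ++ "     -     " ++ PySem.Int.toStr ip1 ++ "." ++ PySem.Int.toStr (o2 + bs - 1) ++ ".255.254"

def class_a_range_alt (ip1 : Int) (ip2 : Int) (ip3 : Int) (ip4 : Int) (block_size : Int) (block_get : Int) : List (List String) :=
  if block_get = 4 ∧ block_size ≠ 1 then
    let n := (PySem.List.pyRange 0 256 block_size).length
    let m := if n = 0 then 0 else 6
    let p := (List.range m).foldl (fun (acc : List String × List String) i =>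
        (acc.1 ++ [pvB4rowR ip1 block_size n i],
         if block_size > 2 then acc.2 ++ [pvB4rowU ip1 block_size n i] else acc.2)) ([], [])
    [p.1, p.2]
  else if block_get = 3 then
    let n := (PySem.List.pyRange 0 256 block_size).length
    let m := if n = 0 then 0 else 6
    let p := (List.range m).foldl (fun (acc : List String × List String) i =>
        (acc.1 ++ [pvB3rowR ip1 block_size n i], acc.2 ++ [pvB3rowU ip1 block_size n i])) ([], [])
    [p.1, p.2]
  else if block_get = 2 then
    let n := (PySem.List.pyRange 0 256 block_size).length
    let p := (List.range (min 6 n)).foldl (fun (acc : List String × List String) i =>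
        (acc.1 ++ [pvB2rowR ip1 block_size i], acc.2 ++ [pvB2rowU ip1 block_size i])) ([], [])
    [p.1, p.2]
  else [[], []]

-- ===== PRECONDITION & SPEC =====
-- Pre_ excludes block_size = 0 with block_get ∈ {2,3,4}: there Python's range(0,256,0) raises ValueError (in both A and B).
def Pre_class_a_range (ip1 : Int) (ip2 : Int) (ip3 : Int) (ip4 : Int) (block_size : Int) (block_get : Int) : Prop :=
  block_size ≠ 0 ∨ (block_get ≠ 2 ∧ block_get ≠ 3 ∧ block_get ≠ 4)
instance (ip1 : Int) (ip2 : Int) (ip3 : Int) (ip4 : Int) (block_size : Int) (block_get : Int) : Decidable (Pre_class_a_range ip1 ip2 ip3 ip4 block_size block_get) := by unfold Pre_class_a_range; infer_instance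

def pvWitness_class_a_range : Int × Int × Int × Int × Int × Int := (10, 0, 0, 0, 64, 3)

-- For block_get 3 or 4 with 52 ≤ block_size ≤ 63 or block_size ≥ 256 (inner range length 1 or 5),
-- A's break counter stops after only 5 rows because the inner sweep ends exactly when loop_run
-- reaches 6; B returns the intended 6-row preview.
def D_class_a_range (ip1 : Int) (ip2 : Int) (ip3 : Int) (ip4 : Int) (block_size : Int) (block_get : Int) : Prop :=
  (block_get = 3 ∨ block_get = 4) ∧ ((52 ≤ block_size ∧ block_size ≤ 63) ∨ 256 ≤ block_size)
instance (ip1 : Int) (ip2 : Int) (ip3 : Int) (ip4 : Int) (block_size : Int) (block_get : Int) : Decidable (D_class_a_range ip1 ip2 ip3 ip4 block_size block_get) := by unfold D_class_a_range; infer_instance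

def Spec_class_a_range (ip1 : Int) (ip2 : Int) (ip3 : Int) (ip4 : Int) (block_size : Int) (block_get : Int) (out : List (List String)) : Prop := ¬ D_class_a_range ip1 ip2 ip3 ip4 block_size block_get → out = class_a_range_alt ip1 ip2 ip3 ip4 block_size block_get
instance (ip1 : Int) (ip2 : Int) (ip3 : Int) (ip4 : Int) (block_size : Int) (block_get : Int) (out : List (List String)) : Decidable (Spec_class_a_range ip1 ip2 ip3 ip4 block_size block_get out) := by unfold Spec_class_a_range; infer_instance

def pvDiffWitness_class_a_range : Int × Int × Int × Int × Int × Int := (10, 0, 0, 0, 256, 3)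
def pvDiffWitnessOut_class_a_range : (List (List String)) × (List (List String)) :=
  ([["10.0.0.0     -     10.0.255.255", "10.1.0.0     -     10.1.255.255", "10.2.0.0     -     10.2.255.255", "10.3.0.0     -     10.3.255.255", "10.4.0.0     -     10.4.255.255"],
    ["10.0.0.1     -     10.0.255.254", "10.1.0.1     -     10.1.255.254", "10.2.0.1     -     10.2.255.254", "10.3.0.1     -     10.3.255.254", "10.4.0.1     -     10.4.255.254"]],
   [["10.0.0.0     -     10.0.255.255", "10.1.0.0     -     10.1.255.255", "10.2.0.0     -     10.2.255.255", "10.3.0.0     -     10.3.255.255", "10.4.0.0     -     10.4.255.255", "10.5.0.0     -     10.5.255.255"],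
    ["10.0.0.1     -     10.0.255.254", "10.1.0.1     -     10.1.255.254", "10.2.0.1     -     10.2.255.254", "10.3.0.1     -     10.3.255.254", "10.4.0.1     -     10.4.255.254", "10.5.0.1     -     10.5.255.254"]])

-- ===== CLAIM (what is proved, stated in full; the proofs are below) =====
def Claim_unchanged_class_a_range : Prop := ∀ (ip1 : Int) (ip2 : Int) (ip3 : Int) (ip4 : Int) (block_size : Int) (block_get : Int), Dom_class_a_range ip1 ip2 ip3 ip4 block_size block_get → Pre_class_a_range ip1 ip2 ip3 ip4 block_size block_get → Spec_class_a_range ip1 ip2 ip3 ip4 block_size block_get (class_a_range ip1 ip2 ip3 ip4 block_size block_get)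
def Claim_changed_class_a_range : Prop := Dom_class_a_range (pvDiffWitness_class_a_range.1) (pvDiffWitness_class_a_range.2.1) (pvDiffWitness_class_a_range.2.2.1) (pvDiffWitness_class_a_range.2.2.2.1) (pvDiffWitness_class_a_range.2.2.2.2.1) (pvDiffWitness_class_a_range.2.2.2.2.2) ∧ Pre_class_a_range (pvDiffWitness_class_a_range.1) (pvDiffWitness_class_a_range.2.1) (pvDiffWitness_class_a_range.2.2.1) (pvDiffWitness_class_a_range.2.2.2.1) (pvDiffWitness_class_a_range.2.2.2.2.1) (pvDiffWitness_class_a_range.2.2.2.2.2) ∧ D_class_a_range (pvDiffWitness_class_a_range.1) (pvDiffWitness_class_a_range.2.1) (pvDiffWitness_class_a_range.2.2.1) (pvDiffWitness_class_a_range.2.2.2.1) (pvDiffWitness_class_a_range.2.2.2.2.1) (pvDiffWitness_class_a_range.2.2.2.2.2) ∧ class_a_range (pvDiffWitness_class_a_range.1) (pvDiffWitness_class_a_range.2.1) (pvDiffWitness_class_a_range.2.2.1) (pvDiffWitness_class_a_range.2.2.2.1) (pvDiffWitness_class_a_range.2.2.2.2.1) (pvDiffWitness_class_a_range.2.2.2.2.2)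 = pvDiffWitnessOut_class_a_range.1 ∧ class_a_range_alt (pvDiffWitness_class_a_range.1) (pvDiffWitness_class_a_range.2.1) (pvDiffWitness_class_a_range.2.2.1) (pvDiffWitness_class_a_range.2.2.2.1) (pvDiffWitness_class_a_range.2.2.2.2.1) (pvDiffWitness_class_a_range.2.2.2.2.2) = pvDiffWitnessOut_class_a_range.2 ∧ pvDiffWitnessOut_class_a_range.1 ≠ pvDiffWitnessOut_class_a_range.2
def Claim_exact_class_a_range : Prop := ∀ (ip1 : Int) (ip2 : Int) (ip3 : Int) (ip4 : Int) (block_size : Int) (block_get : Int), Dom_class_a_range ip1 ip2 ip3 ip4 block_size block_get → Pre_class_a_range ip1 ip2 ip3 ip4 block_size block_get → D_class_a_range ip1 ip2 ip3 ip4 block_size block_get → class_a_range ip1 ip2 ip3 ip4 block_size block_get ≠ class_a_range_alt ip1 ip2 ip3 ip4 block_size block_get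

-- ===== LEMMAS AND PROOFS =====

-- row builders (proof-side names for the strings A's loops build)
def rowA4R (ip1 ip2 ip3 bs v : Int) : String :=
  (PySem.Int.toStr ip1 ++ "." ++ PySem.Int.toStr ip2 ++ "." ++ PySem.Int.toStr ip3 ++ "." ++ PySem.Int.toStr v) ++ pvSep ++ (PySem.Int.toStr ip1 ++ "." ++ PySem.Int.toStr ip2 ++ "." ++ PySem.Int.toStr ip3 ++ "." ++ PySem.Int.toStr (v + bs - 1))
def rowA4U (ip1 ip2 ip3 bs v : Int) : String :=
  (PySem.Int.toStr ip1 ++ "." ++ PySem.Int.toStr ip2 ++ "." ++ PySem.Int.toStr ip3 ++ "." ++ PySem.Int.toStr (v + 1)) ++ pvSep ++ (PySem.Int.toStr ip1 ++ "." ++ PySem.Int.toStr ip2 ++ "." ++ PySem.Int.toStr ip3 ++ "." ++ PySem.Int.toStr (v + bs - 2))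
def rowA3R (ip1 ip2 bs v : Int) : String :=
  (PySem.Int.toStr ip1 ++ "." ++ PySem.Int.toStr ip2 ++ "." ++ PySem.Int.toStr v ++ "." ++ PySem.Int.toStr (0 : Int)) ++ pvSep ++ (PySem.Int.toStr ip1 ++ "." ++ PySem.Int.toStr ip2 ++ "." ++ PySem.Int.toStr (v + bs - 1) ++ "." ++ PySem.Int.toStr (255 : Int))
def rowA3U (ip1 ip2 bs v : Int) : String :=
  (PySem.Int.toStr ip1 ++ "." ++ PySem.Int.toStr ip2 ++ "." ++ PySem.Int.toStr v ++ "." ++ PySem.Int.toStr (1 : Int)) ++ pvSep ++ (PySem.Int.toStr ip1 ++ "." ++ PySem.Int.toStr ip2 ++ "." ++ PySem.Int.toStr (v + bs - 1) ++ "." ++ PySem.Int.toStr (254 : Int))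
def rowA2R (ip1 bs v : Int) : String :=
  (PySem.Int.toStr ip1 ++ "." ++ PySem.Int.toStr v ++ "." ++ PySem.Int.toStr (255 : Int) ++ "." ++ PySem.Int.toStr (0 : Int)) ++ pvSep ++ (PySem.Int.toStr ip1 ++ "." ++ PySem.Int.toStr (v + bs - 1) ++ "." ++ PySem.Int.toStr (255 : Int) ++ "." ++ PySem.Int.toStr (255 : Int))
def rowA2U (ip1 bs v : Int) : String :=
  (PySem.Int.toStr ip1 ++ "." ++ PySem.Int.toStr v ++ "." ++ PySem.Int.toStr (255 : Int) ++ "." ++ PySem.Int.toStr (1 : Int)) ++ pvSep ++ (PySem.Int.toStr ip1 ++ "." ++ PySem.Int.toStr (v + bs - 1) ++ "." ++ PySem.Int.toStr (255 : Int) ++ "." ++ PySem.Int.toStr (254 : Int))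

-- generic pair-accumulator folds
lemma pvFoldPair (f g : Nat → String) (l : List Nat) (a b : List String) :
    l.foldl (fun (acc : List String × List String) i => (acc.1 ++ [f i], acc.2 ++ [g i])) (a, b)
      = (a ++ l.map f, b ++ l.map g) := by
  induction l generalizing a b with
  | nil => simp
  | cons x xs ih => simp [ih]

lemma pvFoldFst (f : Nat → String) (l : List Nat) (a b : List String) :
    l.foldl (fun (acc : List String × List String) i => (acc.1 ++ [f i], acc.2)) (a, b)
      = (a ++ l.map f, b) := by
  induction l generalizing a with
  | nil => simp
  | cons x xs ih => simp [ih]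

lemma pvFoldPairIte (c : Prop) [Decidable c] (f g : Nat → String) (l : List Nat) (a b : List String) :
    l.foldl (fun (acc : List String × List String) i => (acc.1 ++ [f i], if c then acc.2 ++ [g i] else acc.2)) (a, b)
      = (a ++ l.map f, if c then b ++ l.map g else b) := by
  by_cases hc : c
  · simp only [if_pos hc]
    exact pvFoldPair f g l a b
  · simp only [if_neg hc]
    exact pvFoldFst f l a b

-- A-side inner loop characterisations
lemma pvA4inner_char (ip1 ip2 ip3 bs : Int) :
    ∀ (l : List Int) (rs us : List String) (lr : Int), 1 ≤ lr → lr ≤ 6 →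
    pvA4inner ip1 ip2 ip3 bs l (rs, us, lr) =
      (rs ++ (l.take (min l.length (7 - lr).toNat)).map (rowA4R ip1 ip2 ip3 bs),
       us ++ (if bs > 2 then (l.take (min l.length (7 - lr).toNat)).map (rowA4U ip1 ip2 ip3 bs) else []),
       min (lr + l.length) 6) := by
  intro l
  induction l with
  | nil =>
      intro rs us lr h1 h6
      have : min (lr + ([] : List Int).length) 6 = lr := by simp; omega
      simp [pvA4inner, this]
      omega
  | cons a l ih =>
      intro rs us lr h1 h6
      simp only [pvA4inner]
      by_cases hlr : lr = 6
      · subst hlr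
        rw [if_pos rfl]
        have ht : min (a :: l).length (7 - (6 : Int)).toNat = 1 := by
          simp
        have hm : min ((6 : Int) + (a :: l).length) 6 = 6 := by
          have : (0 : Int) ≤ ((a :: l).length : Int) := by positivity
          omega
        rw [ht, hm]
        by_cases hbs2 : (2 : Int) < bs <;> simp [rowA4R, rowA4U, hbs2]
      · have hlt : lr < 6 := lt_of_le_of_ne h6 hlr
        rw [if_neg hlr, ih _ _ _ (by omega) (by omega)]
        have hk : min (a :: l).length (7 - lr).toNat = (min l.length (7 - (lr + 1)).toNat) + 1 := by
          simp only [List.length_cons]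
          omega
        have hm : min ((lr + 1) + (l.length : Int)) 6 = min (lr + ((a :: l).length : Int)) 6 := by
          simp only [List.length_cons]
          push_cast
          omega
        rw [hk, hm, List.take_succ_cons]
        simp [rowA4R, rowA4U]
        by_cases hbs2 : bs > 2 <;> simp [hbs2]

lemma pvA3inner_char (ip1 ip2 bs : Int) :
    ∀ (l : List Int) (rs us : List String) (lr : Int), 1 ≤ lr → lr ≤ 6 →
    pvA3inner ip1 ip2 bs l (rs, us, lr) =
      (rs ++ (l.take (min l.length (7 - lr).toNat)).map (rowA3R ip1 ip2 bs),
       us ++ (l.take (min l.length (7 - lr).toNat)).map (rowA3U ip1 ip2 bs),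
       min (lr + l.length) 6) := by
  intro l
  induction l with
  | nil =>
      intro rs us lr h1 h6
      have : min (lr + ([] : List Int).length) 6 = lr := by simp; omega
      simp [pvA3inner, this]
      omega
  | cons a l ih =>
      intro rs us lr h1 h6
      simp only [pvA3inner]
      by_cases hlr : lr = 6
      · subst hlr
        rw [if_pos rfl]
        have ht : min (a :: l).length (7 - (6 : Int)).toNat = 1 := by
          simp
        have hm : min ((6 : Int) + (a :: l).length) 6 = 6 := by
          have : (0 : Int) ≤ ((a :: l).length : Int) := by positivity
          omega
        rw [ht, hm]
        simp [rowA3R, rowA3U]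
      · have hlt : lr < 6 := lt_of_le_of_ne h6 hlr
        rw [if_neg hlr, ih _ _ _ (by omega) (by omega)]
        have hk : min (a :: l).length (7 - lr).toNat = (min l.length (7 - (lr + 1)).toNat) + 1 := by
          simp only [List.length_cons]
          omega
        have hm : min ((lr + 1) + (l.length : Int)) 6 = min (lr + ((a :: l).length : Int)) 6 := by
          simp only [List.length_cons]
          push_cast
          omega
        rw [hk, hm, List.take_succ_cons]
        simp [rowA3R, rowA3U]

lemma pvA2loop_char (ip1 bs : Int) :
    ∀ (l : List Int) (rs us : List String) (lr : Int), 1 ≤ lr → lr ≤ 6 →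
    pvA2loop ip1 bs l (rs, us, lr) =
      (rs ++ (l.take (min l.length (7 - lr).toNat)).map (rowA2R ip1 bs),
       us ++ (l.take (min l.length (7 - lr).toNat)).map (rowA2U ip1 bs),
       min (lr + l.length) 6) := by
  intro l
  induction l with
  | nil =>
      intro rs us lr h1 h6
      have : min (lr + ([] : List Int).length) 6 = lr := by simp; omega
      simp [pvA2loop, this]
      omega
  | cons a l ih =>
      intro rs us lr h1 h6
      simp only [pvA2loop]
      by_cases hlr : lr = 6
      · subst hlr
        rw [if_pos rfl]
        have ht : min (a :: l).length (7 - (6 : Int)).toNat = 1 := by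
          simp
        have hm : min ((6 : Int) + (a :: l).length) 6 = 6 := by
          have : (0 : Int) ≤ ((a :: l).length : Int) := by positivity
          omega
        rw [ht, hm]
        simp [rowA2R, rowA2U]
      · have hlt : lr < 6 := lt_of_le_of_ne h6 hlr
        rw [if_neg hlr, ih _ _ _ (by omega) (by omega)]
        have hk : min (a :: l).length (7 - lr).toNat = (min l.length (7 - (lr + 1)).toNat) + 1 := by
          simp only [List.length_cons]
          omega
        have hm : min ((lr + 1) + (l.length : Int)) 6 = min (lr + ((a :: l).length : Int)) 6 := by
          simp only [List.length_cons]
          push_cast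
          omega
        rw [hk, hm, List.take_succ_cons]
        simp [rowA2R, rowA2U]

-- empty inner range (negative block_size): the loops never append
lemma pvA4mid_nil (ip1 ip2 bs : Int) (hnil : PySem.List.pyRange 0 256 bs = []) :
    ∀ (l3 : List Int) (st : List String × List String × Int), st.2.2 ≠ 6 →
    pvA4mid ip1 ip2 bs l3 st = st := by
  intro l3
  induction l3 with
  | nil => intro st _; rfl
  | cons c rest ih =>
      intro st h
      simp only [pvA4mid, hnil, pvA4inner]
      rw [if_neg h]
      exact ih st h

lemma pvA4outer_nil (ip1 bs : Int) (hnil : PySem.List.pyRange 0 256 bs = []) :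
    ∀ (l2 : List Int) (st : List String × List String × Int), st.2.2 ≠ 6 →
    pvA4outer ip1 bs l2 st = st := by
  intro l2
  induction l2 with
  | nil => intro st _; rfl
  | cons c rest ih =>
      intro st h
      simp only [pvA4outer]
      rw [pvA4mid_nil ip1 c bs hnil _ st h, if_neg h]
      exact ih st h

lemma pvA3outer_nil (ip1 bs : Int) (hnil : PySem.List.pyRange 0 256 bs = []) :
    ∀ (l2 : List Int) (st : List String × List String × Int), st.2.2 ≠ 6 →
    pvA3outer ip1 bs l2 st = st := by
  intro l2
  induction l2 with
  | nil => intro st _; rfl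
  | cons c rest ih =>
      intro st h
      simp only [pvA3outer, hnil, pvA3inner]
      rw [if_neg h]
      exact ih st h

-- merging one full inner pass with the remaining sweep
lemma pvHeadPass (row : Int → Int → String) (bs c : Int) (N k : Nat) (hk : k ≤ N) :
    (List.range k).map (fun (t : Nat) => row (c + ((t / N : Nat) : Int)) (0 + bs * ((t % N : Nat) : Int)))
      = (List.range k).map (fun (t : Nat) => row c (0 + bs * (t : Int))) := by
  apply List.map_congr_left
  intro t ht
  rw [List.mem_range] at ht
  have h1 : t / N = 0 := Nat.div_eq_of_lt (by omega)
  have h2 : t % N = t := Nat.mod_eq_of_lt (by omega)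
  rw [h1, h2]
  simp

lemma pvMerge (row : Int → Int → String) (bs c : Int) (N K' : Nat) (hN : 1 ≤ N) :
    (List.range N).map (fun (t : Nat) => row c (0 + bs * (t : Int)))
      ++ (List.range K').map (fun (t : Nat) => row ((c + 1) + ((t / N : Nat) : Int)) (0 + bs * ((t % N : Nat) : Int)))
      = (List.range (N + K')).map (fun (t : Nat) => row (c + ((t / N : Nat) : Int)) (0 + bs * ((t % N : Nat) : Int))) := by
  rw [List.range_add, List.map_append, List.map_map]
  congr 1
  · rw [pvHeadPass row bs c N N le_rfl]
  · apply List.map_congr_left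
    intro t _
    simp only [Function.comp_apply]
    have h1 : (N + t) / N = t / N + 1 := Nat.add_div_left t (by omega)
    have h2 : (N + t) % N = t % N := Nat.add_mod_left N t
    rw [h1, h2]
    congr 1
    push_cast
    ring

-- the outer sweep: entry t gets outer octet c + t/N and inner index t%N
lemma pvA3outer_char (ip1 bs : Int) (N : Nat) (hN : 1 ≤ N)
    (hrange : PySem.List.pyRange 0 256 bs = (List.range N).map (fun (k : Nat) => 0 + bs * (k : Int))) :
    ∀ (c lr : Int) (rs us : List String), 0 ≤ c → c ≤ 256 → 1 ≤ lr → lr ≤ 5 →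
      7 - lr ≤ N * (256 - c) →
    pvA3outer ip1 bs (PySem.List.pyRange c 256 1) (rs, us, lr) =
      (rs ++ (List.range (if (6 - lr).toNat % N = 0 then (6 - lr).toNat else (7 - lr).toNat)).map
          (fun (t : Nat) => rowA3R ip1 (c + ((t / N : Nat) : Int)) bs (0 + bs * ((t % N : Nat) : Int))),
       us ++ (List.range (if (6 - lr).toNat % N = 0 then (6 - lr).toNat else (7 - lr).toNat)).map
          (fun (t : Nat) => rowA3U ip1 (c + ((t / N : Nat) : Int)) bs (0 + bs * ((t % N : Nat) : Int))),
       6) := by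
  have main : ∀ (fuel : Nat) (c lr : Int) (rs us : List String), (256 - c).toNat = fuel → 0 ≤ c → c ≤ 256 → 1 ≤ lr → lr ≤ 5 → 7 - lr ≤ N * (256 - c) →
      pvA3outer ip1 bs (PySem.List.pyRange c 256 1) (rs, us, lr) =
        (rs ++ (List.range (if (6 - lr).toNat % N = 0 then (6 - lr).toNat else (7 - lr).toNat)).map
            (fun (t : Nat) => rowA3R ip1 (c + ((t / N : Nat) : Int)) bs (0 + bs * ((t % N : Nat) : Int))),
         us ++ (List.range (if (6 - lr).toNat % N = 0 then (6 - lr).toNat else (7 - lr).toNat)).map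
            (fun (t : Nat) => rowA3U ip1 (c + ((t / N : Nat) : Int)) bs (0 + bs * ((t % N : Nat) : Int))),
         6) := by
    intro fuel
    induction fuel using Nat.strong_induction_on with
    | _ fuel ih =>
      intro c lr rs us hfuel h0 h256 h1 h5 hcap
      have hclt : c < 256 := by nlinarith [hN]
      rw [PySem.List.pyRange_one_cons hclt]
      simp only [pvA3outer]
      rw [hrange, pvA3inner_char ip1 c bs _ rs us lr h1 (by omega)]
      simp only [List.length_map, List.length_range]
      by_cases hstop : 6 ≤ lr + (N : Int)
      · have hlr6 : min (lr + (N : Int)) 6 = 6 := by omega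
        rw [hlr6, if_pos rfl]
        by_cases heq : (6 - lr).toNat = N
        · have hK : (6 - lr).toNat % N = 0 := by rw [heq, Nat.mod_self]
          have hkin : min N (7 - lr).toNat = N := by omega
          rw [if_pos hK, heq, hkin]
          simp only [← List.map_take, List.take_range, min_self]
          rw [pvHeadPass (fun o v => rowA3R ip1 o bs v) bs c N N le_rfl,
              pvHeadPass (fun o v => rowA3U ip1 o bs v) bs c N N le_rfl]
          simp [List.map_map, Function.comp]
        · have hlt : (6 - lr).toNat < N := by omega
          have hK : ¬ ((6 - lr).toNat % N = 0) := by
            rw [Nat.mod_eq_of_lt hlt]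
            omega
          have hkin : min N (7 - lr).toNat = (7 - lr).toNat := by omega
          rw [if_neg hK, hkin]
          simp only [← List.map_take, List.take_range]
          have hmin : min (7 - lr).toNat N = (7 - lr).toNat := by omega
          rw [hmin]
          rw [pvHeadPass (fun o v => rowA3R ip1 o bs v) bs c N _ (by omega),
              pvHeadPass (fun o v => rowA3U ip1 o bs v) bs c N _ (by omega)]
          simp [List.map_map, Function.comp]
      · have hlr' : min (lr + (N : Int)) 6 = lr + N := by omega
        rw [hlr']
        rw [if_neg (by omega)]
        have hkin : min N (7 - lr).toNat = N := by omega
        rw [hkin]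
        simp only [← List.map_take, List.take_range, min_self]
        have hfuel' : (256 - (c + 1)).toNat < fuel := by omega
        have hprod : (N : Int) * (256 - (c + 1)) = N * (256 - c) - N := by ring
        rw [ih _ hfuel' (c + 1) (lr + N) _ _ rfl (by omega) (by omega) (by omega) (by omega) (by omega)]
        have hcond : ((6 - (lr + N)).toNat % N = 0) = ((6 - lr).toNat % N = 0) := by
          have hx : (6 - lr).toNat = N + (6 - (lr + N)).toNat := by omega
          rw [hx, Nat.add_mod_left]
        by_cases hc0 : (6 - (lr + N)).toNat % N = 0
        · have hc0' : (6 - lr).toNat % N = 0 := by rw [← hcond]; exact hc0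
          rw [if_pos hc0, if_pos hc0']
          have hKeq : (6 - lr).toNat = N + (6 - (lr + N)).toNat := by omega
          rw [hKeq]
          rw [List.append_assoc, List.append_assoc]
          congr 1
          · rw [← pvMerge (fun o v => rowA3R ip1 o bs v) bs c N _ hN]
            simp [List.map_map, Function.comp]
          · congr 1
            rw [← pvMerge (fun o v => rowA3U ip1 o bs v) bs c N _ hN]
            simp [List.map_map, Function.comp]
        · have hc0' : ¬ ((6 - lr).toNat % N = 0) := by rw [← hcond]; exact hc0
          rw [if_neg hc0, if_neg hc0']
          have hKeq : (7 - lr).toNat = N + (7 - (lr + N)).toNat := by omega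
          rw [hKeq]
          rw [List.append_assoc, List.append_assoc]
          congr 1
          · rw [← pvMerge (fun o v => rowA3R ip1 o bs v) bs c N _ hN]
            simp [List.map_map, Function.comp]
          · congr 1
            rw [← pvMerge (fun o v => rowA3U ip1 o bs v) bs c N _ hN]
            simp [List.map_map, Function.comp]
  intro c lr rs us h0 h256 h1 h5 hcap
  exact main _ c lr rs us rfl h0 h256 h1 h5 hcap

lemma pvA4mid_char (ip1 ip2 bs : Int) (N : Nat) (hN : 1 ≤ N)
    (hrange : PySem.List.pyRange 0 256 bs = (List.range N).map (fun (k : Nat) => 0 + bs * (k : Int))) :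
    ∀ (c lr : Int) (rs us : List String), 0 ≤ c → c ≤ 256 → 1 ≤ lr → lr ≤ 5 →
      7 - lr ≤ N * (256 - c) →
    pvA4mid ip1 ip2 bs (PySem.List.pyRange c 256 1) (rs, us, lr) =
      (rs ++ (List.range (if (6 - lr).toNat % N = 0 then (6 - lr).toNat else (7 - lr).toNat)).map
          (fun (t : Nat) => rowA4R ip1 ip2 (c + ((t / N : Nat) : Int)) bs (0 + bs * ((t % N : Nat) : Int))),
       us ++ (if bs > 2 then (List.range (if (6 - lr).toNat % N = 0 then (6 - lr).toNat else (7 - lr).toNat)).map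
          (fun (t : Nat) => rowA4U ip1 ip2 (c + ((t / N : Nat) : Int)) bs (0 + bs * ((t % N : Nat) : Int))) else []),
       6) := by
  have main : ∀ (fuel : Nat) (c lr : Int) (rs us : List String), (256 - c).toNat = fuel → 0 ≤ c → c ≤ 256 → 1 ≤ lr → lr ≤ 5 → 7 - lr ≤ N * (256 - c) →
      pvA4mid ip1 ip2 bs (PySem.List.pyRange c 256 1) (rs, us, lr) =
        (rs ++ (List.range (if (6 - lr).toNat % N = 0 then (6 - lr).toNat else (7 - lr).toNat)).map
            (fun (t : Nat) => rowA4R ip1 ip2 (c + ((t / N : Nat) : Int)) bs (0 + bs * ((t % N : Nat) : Int))),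
         us ++ (if bs > 2 then (List.range (if (6 - lr).toNat % N = 0 then (6 - lr).toNat else (7 - lr).toNat)).map
            (fun (t : Nat) => rowA4U ip1 ip2 (c + ((t / N : Nat) : Int)) bs (0 + bs * ((t % N : Nat) : Int))) else []),
         6) := by
    intro fuel
    induction fuel using Nat.strong_induction_on with
    | _ fuel ih =>
      intro c lr rs us hfuel h0 h256 h1 h5 hcap
      have hclt : c < 256 := by nlinarith [hN]
      rw [PySem.List.pyRange_one_cons hclt]
      simp only [pvA4mid]
      by_cases hbs2 : (2 : Int) < bs
      ·
        rw [hrange, pvA4inner_char ip1 ip2 c bs _ rs us lr h1 (by omega)]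
        simp only [if_pos hbs2]
        simp only [List.length_map, List.length_range]
        by_cases hstop : 6 <= lr + (N : Int)
        · have hlr6 : min (lr + (N : Int)) 6 = 6 := by omega
          rw [hlr6, if_pos rfl]
          by_cases heq : (6 - lr).toNat = N
          · have hK : (6 - lr).toNat % N = 0 := by rw [heq, Nat.mod_self]
            have hkin : min N (7 - lr).toNat = N := by omega
            rw [if_pos hK, heq, hkin]
            simp only [← List.map_take, List.take_range, min_self]
            rw [pvHeadPass (fun o v => rowA4R ip1 ip2 o bs v) bs c N N le_rfl,
                pvHeadPass (fun o v => rowA4U ip1 ip2 o bs v) bs c N N le_rfl]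
            simp [List.map_map, Function.comp]
          · have hlt : (6 - lr).toNat < N := by omega
            have hK : ¬ ((6 - lr).toNat % N = 0) := by
              rw [Nat.mod_eq_of_lt hlt]
              omega
            have hkin : min N (7 - lr).toNat = (7 - lr).toNat := by omega
            rw [if_neg hK, hkin]
            simp only [← List.map_take, List.take_range]
            have hmin : min (7 - lr).toNat N = (7 - lr).toNat := by omega
            rw [hmin]
            rw [pvHeadPass (fun o v => rowA4R ip1 ip2 o bs v) bs c N _ (by omega),
                pvHeadPass (fun o v => rowA4U ip1 ip2 o bs v) bs c N _ (by omega)]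
            simp [List.map_map, Function.comp]
        · have hlr' : min (lr + (N : Int)) 6 = lr + N := by omega
          rw [hlr']
          rw [if_neg (by omega)]
          have hkin : min N (7 - lr).toNat = N := by omega
          rw [hkin]
          simp only [← List.map_take, List.take_range, min_self]
          have hfuel' : (256 - (c + 1)).toNat < fuel := by omega
          have hprod : (N : Int) * (256 - (c + 1)) = N * (256 - c) - N := by ring
          rw [ih _ hfuel' (c + 1) (lr + N) _ _ rfl (by omega) (by omega) (by omega) (by omega) (by omega)]
          simp only [if_pos hbs2]
          have hcond : ((6 - (lr + N)).toNat % N = 0) = ((6 - lr).toNat % N = 0) := by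
            have hx : (6 - lr).toNat = N + (6 - (lr + N)).toNat := by omega
            rw [hx, Nat.add_mod_left]
          by_cases hc0 : (6 - (lr + N)).toNat % N = 0
          · have hc0' : (6 - lr).toNat % N = 0 := by rw [← hcond]; exact hc0
            rw [if_pos hc0, if_pos hc0']
            have hKeq : (6 - lr).toNat = N + (6 - (lr + N)).toNat := by omega
            rw [hKeq]
            rw [List.append_assoc, List.append_assoc]
            congr 1
            · rw [← pvMerge (fun o v => rowA4R ip1 ip2 o bs v) bs c N _ hN]
              simp [List.map_map, Function.comp]
            · congr 1
              rw [← pvMerge (fun o v => rowA4U ip1 ip2 o bs v) bs c N _ hN]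
              simp [List.map_map, Function.comp]
          · have hc0' : ¬ ((6 - lr).toNat % N = 0) := by rw [← hcond]; exact hc0
            rw [if_neg hc0, if_neg hc0']
            have hKeq : (7 - lr).toNat = N + (7 - (lr + N)).toNat := by omega
            rw [hKeq]
            rw [List.append_assoc, List.append_assoc]
            congr 1
            · rw [← pvMerge (fun o v => rowA4R ip1 ip2 o bs v) bs c N _ hN]
              simp [List.map_map, Function.comp]
            · congr 1
              rw [← pvMerge (fun o v => rowA4U ip1 ip2 o bs v) bs c N _ hN]
              simp [List.map_map, Function.comp]
      ·
        rw [hrange, pvA4inner_char ip1 ip2 c bs _ rs us lr h1 (by omega)]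
        simp only [if_neg hbs2]
        simp only [List.length_map, List.length_range]
        by_cases hstop : 6 <= lr + (N : Int)
        · have hlr6 : min (lr + (N : Int)) 6 = 6 := by omega
          rw [hlr6, if_pos rfl]
          by_cases heq : (6 - lr).toNat = N
          · have hK : (6 - lr).toNat % N = 0 := by rw [heq, Nat.mod_self]
            have hkin : min N (7 - lr).toNat = N := by omega
            rw [if_pos hK, heq, hkin]
            simp only [← List.map_take, List.take_range, min_self]
            rw [pvHeadPass (fun o v => rowA4R ip1 ip2 o bs v) bs c N N le_rfl]
            simp [List.map_map, Function.comp]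
          · have hlt : (6 - lr).toNat < N := by omega
            have hK : ¬ ((6 - lr).toNat % N = 0) := by
              rw [Nat.mod_eq_of_lt hlt]
              omega
            have hkin : min N (7 - lr).toNat = (7 - lr).toNat := by omega
            rw [if_neg hK, hkin]
            simp only [← List.map_take, List.take_range]
            have hmin : min (7 - lr).toNat N = (7 - lr).toNat := by omega
            rw [hmin]
            rw [pvHeadPass (fun o v => rowA4R ip1 ip2 o bs v) bs c N _ (by omega)]
            simp [List.map_map, Function.comp]
        · have hlr' : min (lr + (N : Int)) 6 = lr + N := by omega
          rw [hlr']
          rw [if_neg (by omega)]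
          have hkin : min N (7 - lr).toNat = N := by omega
          rw [hkin]
          simp only [← List.map_take, List.take_range, min_self]
          have hfuel' : (256 - (c + 1)).toNat < fuel := by omega
          have hprod : (N : Int) * (256 - (c + 1)) = N * (256 - c) - N := by ring
          rw [ih _ hfuel' (c + 1) (lr + N) _ _ rfl (by omega) (by omega) (by omega) (by omega) (by omega)]
          simp only [if_neg hbs2]
          have hcond : ((6 - (lr + N)).toNat % N = 0) = ((6 - lr).toNat % N = 0) := by
            have hx : (6 - lr).toNat = N + (6 - (lr + N)).toNat := by omega
            rw [hx, Nat.add_mod_left]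
          by_cases hc0 : (6 - (lr + N)).toNat % N = 0
          · have hc0' : (6 - lr).toNat % N = 0 := by rw [← hcond]; exact hc0
            rw [if_pos hc0, if_pos hc0']
            have hKeq : (6 - lr).toNat = N + (6 - (lr + N)).toNat := by omega
            rw [hKeq]
            rw [List.append_assoc]
            congr 1
            · rw [← pvMerge (fun o v => rowA4R ip1 ip2 o bs v) bs c N _ hN]
              simp [List.map_map, Function.comp]
            · simp
          · have hc0' : ¬ ((6 - lr).toNat % N = 0) := by rw [← hcond]; exact hc0
            rw [if_neg hc0, if_neg hc0']
            have hKeq : (7 - lr).toNat = N + (7 - (lr + N)).toNat := by omega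
            rw [hKeq]
            rw [List.append_assoc]
            congr 1
            · rw [← pvMerge (fun o v => rowA4R ip1 ip2 o bs v) bs c N _ hN]
              simp [List.map_map, Function.comp]
            · simp
  intro c lr rs us h0 h256 h1 h5 hcap
  exact main _ c lr rs us rfl h0 h256 h1 h5 hcap

-- pyRange facts and row equalities
lemma pvRangeNeg (bs : Int) (h : bs < 0) : PySem.List.pyRange 0 256 bs = [] := by
  rw [PySem.List.pyRange_of_neg _ _ h]
  norm_num

lemma pvRangePos (bs : Int) (h : 0 < bs) :
    PySem.List.pyRange 0 256 bs = (List.range ((256 - 0 + bs - 1) / bs).toNat).map (fun (k : Nat) => 0 + bs * (k : Int)) := by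
  rw [PySem.List.pyRange_of_pos _ _ h, if_pos (by norm_num : (0:Int) < 256)]

lemma pvNpos (bs : Int) (h : 0 < bs) : 1 ≤ ((256 - 0 + bs - 1) / bs).toNat := by
  have h1 : (1 : Int) ≤ (256 - 0 + bs - 1) / bs := by
    rw [Int.le_ediv_iff_mul_le h]
    omega
  omega

-- the inner-range length is 1 or 5 (i.e. A's counter stops at 5 rows) exactly on D_'s block sizes
lemma pvModIff (bs : Int) (hpos : 0 < bs) :
    (5 % ((256 - 0 + bs - 1) / bs).toNat = 0) ↔ ((52 ≤ bs ∧ bs ≤ 63) ∨ 256 ≤ bs) := by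
  have he : (256 - 0 + bs - 1 : Int) = 255 + bs := by ring
  rw [he]
  have hd : bs * ((255 + bs) / bs) + (255 + bs) % bs = 255 + bs := Int.ediv_add_emod _ _
  have hr0 : 0 ≤ (255 + bs) % bs := Int.emod_nonneg _ (ne_of_gt hpos)
  have hrlt : (255 + bs) % bs < bs := Int.emod_lt_of_pos _ hpos
  have hq0 : 0 ≤ (255 + bs) / bs := Int.ediv_nonneg (by omega) hpos.le
  constructor
  · intro h
    have hN0 : ((255 + bs) / bs).toNat ≠ 0 := by
      intro h0
      rw [h0] at h
      simp at h
    have hdvd : ((255 + bs) / bs).toNat ∣ 5 := Nat.dvd_of_mod_eq_zero h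
    have h15 := (Nat.prime_five).eq_one_or_self_of_dvd _ hdvd
    rcases h15 with h1 | h5
    · have hq1 : (255 + bs) / bs = 1 := by omega
      rw [hq1] at hd
      right
      omega
    · have hq5 : (255 + bs) / bs = 5 := by omega
      rw [hq5] at hd
      left
      omega
  · intro h
    rcases h with ⟨h52, h63⟩ | h256
    · have hub : bs * ((255 + bs) / bs) < bs * 6 := by linarith
      have hq6 : (255 + bs) / bs < 6 := lt_of_mul_lt_mul_left hub hpos.le
      have hlb : bs * 4 < bs * ((255 + bs) / bs) := by linarith
      have hq4 : 4 < (255 + bs) / bs := lt_of_mul_lt_mul_left hlb hpos.le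
      have : ((255 + bs) / bs).toNat = 5 := by omega
      rw [this]
    · have hub : bs * ((255 + bs) / bs) < bs * 2 := by linarith
      have hq2 : (255 + bs) / bs < 2 := lt_of_mul_lt_mul_left hub hpos.le
      have hlb : bs * 0 < bs * ((255 + bs) / bs) := by linarith
      have hq1 : 0 < (255 + bs) / bs := lt_of_mul_lt_mul_left hlb hpos.le
      have : ((255 + bs) / bs).toNat = 1 := by omega
      rw [this]

lemma pvRowEq4R (ip1 bs : Int) (n t : Nat) :
    rowA4R ip1 0 (0 + ((t / n : Nat) : Int)) bs (0 + bs * ((t % n : Nat) : Int)) = pvB4rowR ip1 bs n t := by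
  unfold rowA4R pvB4rowR
  rw [show (0 : Int) + bs * ((t % n : Nat) : Int) = ((t % n : Nat) : Int) * bs from by ring, zero_add]
  apply String.toList_injective
  simp [pvSep, show PySem.Int.toStr (0:Int) = "0" from by decide]

lemma pvRowEq4U (ip1 bs : Int) (n t : Nat) :
    rowA4U ip1 0 (0 + ((t / n : Nat) : Int)) bs (0 + bs * ((t % n : Nat) : Int)) = pvB4rowU ip1 bs n t := by
  unfold rowA4U pvB4rowU
  rw [show (0 : Int) + bs * ((t % n : Nat) : Int) = ((t % n : Nat) : Int) * bs from by ring, zero_add]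
  apply String.toList_injective
  simp [pvSep, show PySem.Int.toStr (0:Int) = "0" from by decide]

lemma pvRowEq3R (ip1 bs : Int) (n t : Nat) :
    rowA3R ip1 (0 + ((t / n : Nat) : Int)) bs (0 + bs * ((t % n : Nat) : Int)) = pvB3rowR ip1 bs n t := by
  unfold rowA3R pvB3rowR
  rw [show (0 : Int) + bs * ((t % n : Nat) : Int) = ((t % n : Nat) : Int) * bs from by ring, zero_add]
  apply String.toList_injective
  simp [pvSep, show PySem.Int.toStr (0:Int) = "0" from by decide,
        show PySem.Int.toStr (255:Int) = "255" from by decide]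

lemma pvRowEq3U (ip1 bs : Int) (n t : Nat) :
    rowA3U ip1 (0 + ((t / n : Nat) : Int)) bs (0 + bs * ((t % n : Nat) : Int)) = pvB3rowU ip1 bs n t := by
  unfold rowA3U pvB3rowU
  rw [show (0 : Int) + bs * ((t % n : Nat) : Int) = ((t % n : Nat) : Int) * bs from by ring, zero_add]
  apply String.toList_injective
  simp [pvSep, show PySem.Int.toStr (1:Int) = "1" from by decide,
        show PySem.Int.toStr (254:Int) = "254" from by decide]

lemma pvRowEq2R (ip1 bs : Int) (t : Nat) :
    rowA2R ip1 bs (0 + bs * (t : Int)) = pvB2rowR ip1 bs t := by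
  unfold rowA2R pvB2rowR
  rw [show (0 : Int) + bs * (t : Int) = (t : Int) * bs from by ring]
  apply String.toList_injective
  simp [pvSep, show PySem.Int.toStr (0:Int) = "0" from by decide,
        show PySem.Int.toStr (255:Int) = "255" from by decide]

lemma pvRowEq2U (ip1 bs : Int) (t : Nat) :
    rowA2U ip1 bs (0 + bs * (t : Int)) = pvB2rowU ip1 bs t := by
  unfold rowA2U pvB2rowU
  rw [show (0 : Int) + bs * (t : Int) = (t : Int) * bs from by ring]
  apply String.toList_injective
  simp [pvSep, show PySem.Int.toStr (1:Int) = "1" from by decide,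
        show PySem.Int.toStr (255:Int) = "255" from by decide,
        show PySem.Int.toStr (254:Int) = "254" from by decide]

-- closed forms of both programs on positive block sizes
lemma pvClosedA4 (ip1 ip2 ip3 ip4 bs : Int) (hpos : 0 < bs) (hbs1 : bs ≠ 1) :
    class_a_range ip1 ip2 ip3 ip4 bs 4 =
      [(List.range (if 5 % ((256 - 0 + bs - 1) / bs).toNat = 0 then 5 else 6)).map (pvB4rowR ip1 bs ((256 - 0 + bs - 1) / bs).toNat),
       if bs > 2 then (List.range (if 5 % ((256 - 0 + bs - 1) / bs).toNat = 0 then 5 else 6)).map (pvB4rowU ip1 bs ((256 - 0 + bs - 1) / bs).toNat) else []] := by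
  have hrange := pvRangePos bs hpos
  have hN : 1 ≤ ((256 - 0 + bs - 1) / bs).toNat := pvNpos bs hpos
  simp only [class_a_range, eq_false (by decide : ¬ ((4:Int) = 2)),
    eq_false (by decide : ¬ ((4:Int) = 3)), if_false, if_true, if_pos (hbs1 : bs ≠ 1)]
  rw [PySem.List.pyRange_one_cons (by norm_num : (0:Int) < 256)]
  simp only [pvA4outer]
  rw [pvA4mid_char ip1 0 bs _ hN hrange 0 1 [] [] le_rfl (by norm_num) le_rfl (by norm_num)
      (by nlinarith)]
  dsimp only
  rw [if_pos (rfl : (6:Int) = 6)]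
  rw [show ((6:Int) - 1).toNat = 5 from by decide,
      show ((7:Int) - 1).toNat = 6 from by decide]
  simp only [List.nil_append, List.cons.injEq]
  refine ⟨?_, ?_, trivial⟩
  · apply List.map_congr_left
    intro t _
    exact pvRowEq4R ip1 bs _ t
  · by_cases hbs2 : (2 : Int) < bs
    · simp only [if_pos hbs2]
      apply List.map_congr_left
      intro t _
      exact pvRowEq4U ip1 bs _ t
    · simp only [if_neg hbs2]

lemma pvClosedB4 (ip1 ip2 ip3 ip4 bs : Int) (hpos : 0 < bs) (hbs1 : bs ≠ 1) :
    class_a_range_alt ip1 ip2 ip3 ip4 bs 4 =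
      [(List.range 6).map (pvB4rowR ip1 bs ((256 - 0 + bs - 1) / bs).toNat),
       if bs > 2 then (List.range 6).map (pvB4rowU ip1 bs ((256 - 0 + bs - 1) / bs).toNat) else []] := by
  have hrange := pvRangePos bs hpos
  have hN : 1 ≤ ((256 - 0 + bs - 1) / bs).toNat := pvNpos bs hpos
  simp only [class_a_range_alt]
  rw [if_pos (show True ∧ bs ≠ 1 from ⟨trivial, hbs1⟩), hrange]
  simp only [List.length_map, List.length_range]
  rw [if_neg (by omega : ¬ ((256 - 0 + bs - 1) / bs).toNat = 0)]
  rw [pvFoldPairIte]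
  simp

lemma pvClosedA3 (ip1 ip2 ip3 ip4 bs : Int) (hpos : 0 < bs) :
    class_a_range ip1 ip2 ip3 ip4 bs 3 =
      [(List.range (if 5 % ((256 - 0 + bs - 1) / bs).toNat = 0 then 5 else 6)).map (pvB3rowR ip1 bs ((256 - 0 + bs - 1) / bs).toNat),
       (List.range (if 5 % ((256 - 0 + bs - 1) / bs).toNat = 0 then 5 else 6)).map (pvB3rowU ip1 bs ((256 - 0 + bs - 1) / bs).toNat)] := by
  have hrange := pvRangePos bs hpos
  have hN : 1 ≤ ((256 - 0 + bs - 1) / bs).toNat := pvNpos bs hpos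
  simp only [class_a_range, eq_false (by decide : ¬ ((3:Int) = 2)),
    eq_false (by decide : ¬ ((3:Int) = 4)), if_false, if_true]
  rw [pvA3outer_char ip1 bs _ hN hrange 0 1 [] [] le_rfl (by norm_num) le_rfl (by norm_num)
      (by nlinarith)]
  dsimp only
  rw [show ((6:Int) - 1).toNat = 5 from by decide,
      show ((7:Int) - 1).toNat = 6 from by decide]
  simp only [List.nil_append, List.cons.injEq]
  refine ⟨?_, ?_, trivial⟩
  · apply List.map_congr_left
    intro t _
    exact pvRowEq3R ip1 bs _ t
  · apply List.map_congr_left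
    intro t _
    exact pvRowEq3U ip1 bs _ t

lemma pvClosedB3 (ip1 ip2 ip3 ip4 bs : Int) (hpos : 0 < bs) :
    class_a_range_alt ip1 ip2 ip3 ip4 bs 3 =
      [(List.range 6).map (pvB3rowR ip1 bs ((256 - 0 + bs - 1) / bs).toNat),
       (List.range 6).map (pvB3rowU ip1 bs ((256 - 0 + bs - 1) / bs).toNat)] := by
  have hrange := pvRangePos bs hpos
  have hN : 1 ≤ ((256 - 0 + bs - 1) / bs).toNat := pvNpos bs hpos
  simp only [class_a_range_alt, eq_false (by decide : ¬ ((3:Int) = 4)), false_and, if_false, if_true]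
  rw [hrange]
  simp only [List.length_map, List.length_range]
  rw [if_neg (by omega : ¬ ((256 - 0 + bs - 1) / bs).toNat = 0)]
  rw [pvFoldPair]
  simp

lemma pvBranch2 (ip1 ip2 ip3 ip4 bs : Int) (hbs : bs ≠ 0) :
    class_a_range ip1 ip2 ip3 ip4 bs 2 = class_a_range_alt ip1 ip2 ip3 ip4 bs 2 := by
  simp only [class_a_range, class_a_range_alt, eq_false (by decide : ¬ ((2:Int) = 3)),
    eq_false (by decide : ¬ ((2:Int) = 4)), false_and, if_false, if_true]
  rcases lt_or_gt_of_ne hbs with hneg | hpos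
  · rw [pvRangeNeg bs hneg]
    simp [pvA2loop]
  · rw [pvRangePos bs hpos]
    have hN : 1 ≤ ((256 - 0 + bs - 1) / bs).toNat := pvNpos bs hpos
    rw [pvA2loop_char ip1 bs _ [] [] 1 (by norm_num) (by norm_num)]
    dsimp only
    simp only [List.length_map, List.length_range]
    rw [pvFoldPair]
    rw [show ((7:Int) - 1).toNat = 6 from by decide]
    dsimp only
    simp only [← List.map_take, List.take_range]
    have hmm : min (min ((256 - 0 + bs - 1) / bs).toNat 6) ((256 - 0 + bs - 1) / bs).toNat
        = min 6 ((256 - 0 + bs - 1) / bs).toNat := by omega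
    rw [hmm]
    simp only [List.map_map, List.nil_append, List.cons.injEq]
    refine ⟨?_, ?_, trivial⟩
    · apply List.map_congr_left
      intro t _
      simp only [Function.comp_apply]
      exact pvRowEq2R ip1 bs t
    · apply List.map_congr_left
      intro t _
      simp only [Function.comp_apply]
      exact pvRowEq2U ip1 bs t

-- ===== VERDICT (by name: the statements are the Claim_ definitions above) =====
theorem class_a_range_spec : Claim_unchanged_class_a_range := by
  intro ip1 ip2 ip3 ip4 bs bg _hdom hpre hnd
  by_cases h4 : bg = 4
  · subst h4
    rcases hpre with hbs | ⟨_, _, h⟩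
    · by_cases hbs1 : bs = 1
      · subst hbs1
        simp [class_a_range, class_a_range_alt]
      · rcases lt_or_gt_of_ne hbs with hneg | hpos
        · have hnil := pvRangeNeg bs hneg
          simp only [class_a_range, class_a_range_alt,
            eq_false (by decide : ¬ ((4:Int) = 2)), eq_false (by decide : ¬ ((4:Int) = 3)),
            if_false, if_true, if_pos (hbs1 : bs ≠ 1), if_pos (show True ∧ bs ≠ 1 from ⟨trivial, hbs1⟩)]
          rw [pvA4outer_nil ip1 bs hnil _ _ (by norm_num), hnil]
          simp
        · have hmod : ¬ (5 % ((256 - 0 + bs - 1) / bs).toNat = 0) := by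
            rw [pvModIff bs hpos]
            intro hc
            exact hnd ⟨Or.inr rfl, hc⟩
          rw [pvClosedA4 ip1 ip2 ip3 ip4 bs hpos hbs1, pvClosedB4 ip1 ip2 ip3 ip4 bs hpos hbs1,
            if_neg hmod]
    · exact absurd rfl h
  · by_cases h3 : bg = 3
    · subst h3
      rcases hpre with hbs | ⟨_, h, _⟩
      · rcases lt_or_gt_of_ne hbs with hneg | hpos
        · have hnil := pvRangeNeg bs hneg
          simp only [class_a_range, class_a_range_alt,
            eq_false (by decide : ¬ ((3:Int) = 2)), eq_false (by decide : ¬ ((3:Int) = 4)),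
            false_and, if_false, if_true]
          rw [pvA3outer_nil ip1 bs hnil _ _ (by norm_num), hnil]
          simp
        · have hmod : ¬ (5 % ((256 - 0 + bs - 1) / bs).toNat = 0) := by
            rw [pvModIff bs hpos]
            intro hc
            exact hnd ⟨Or.inl rfl, hc⟩
          rw [pvClosedA3 ip1 ip2 ip3 ip4 bs hpos, pvClosedB3 ip1 ip2 ip3 ip4 bs hpos, if_neg hmod]
      · exact absurd rfl h
    · by_cases h2 : bg = 2
      · subst h2
        rcases hpre with hbs | ⟨h, _, _⟩
        · exact pvBranch2 ip1 ip2 ip3 ip4 bs hbs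
        · exact absurd rfl h
      · simp [class_a_range, class_a_range_alt, h4, h3, h2]

theorem class_a_range_changed : Claim_changed_class_a_range := by
  unfold Claim_changed_class_a_range
  refine ⟨by decide, by decide, by decide, ?_, ?_, by decide⟩
  · decide
  · decide

theorem class_a_range_tight : Claim_exact_class_a_range := by
  intro ip1 ip2 ip3 ip4 bs bg _hdom _hpre hd
  rcases hd with ⟨hg, hrange⟩
  have hpos : 0 < bs := by rcases hrange with ⟨h, _⟩ | h <;> omega
  have hmod : 5 % ((256 - 0 + bs - 1) / bs).toNat = 0 := (pvModIff bs hpos).mpr hrange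
  have hbs1 : bs ≠ 1 := by rcases hrange with ⟨h, _⟩ | h <;> omega
  rcases hg with h3 | h4
  · subst h3
    rw [pvClosedA3 ip1 ip2 ip3 ip4 bs hpos, pvClosedB3 ip1 ip2 ip3 ip4 bs hpos, if_pos hmod]
    intro h
    have := congrArg (fun (l : List (List String)) => (l.headD []).length) h
    simp at this
  · subst h4
    rw [pvClosedA4 ip1 ip2 ip3 ip4 bs hpos hbs1, pvClosedB4 ip1 ip2 ip3 ip4 bs hpos hbs1,
      if_pos hmod]
    intro h
    have := congrArg (fun (l : List (List String)) => (l.headD []).length) h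
    simp at this
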